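-- pv_equiv track=rewrite | github.com/JasonHammond/Competition-Problem-Solutions | uva/GardenOfEden/uva10001py3.py | dfs
-- ===== SOURCE A (Python) =====
-- def dfs(invert_dict, gen_map, index, goal_state, first=None, prev=None):
--
-- 	curr_val = goal_state[index]
-- 	if curr_val not in invert_dict:
-- 		return False
--
-- 	if index == 0:
-- 		for choice in invert_dict[curr_val]:
-- 			first = prev = choice
-- 			if dfs(invert_dict, gen_map, index+1, goal_state, first, prev):
-- 				return True
-- 	elif index == (len(goal_state)-1):
-- 		for choice_tuple in gen_map[prev]:
-- 			if curr_val == choice_tuple[1]: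
-- 				candidate = choice_tuple[0]
-- 				for tup in gen_map[candidate]:
-- 					if tup[0] == first:
-- 						return True
-- 	else:
-- 		for choice_tuple in gen_map[prev]:
-- 			if curr_val == choice_tuple[1]:
-- 				temp = prev
-- 				prev = choice_tuple[0]
-- 				if dfs(invert_dict, gen_map, index+1, goal_state, first, prev):
-- 					return True
-- 	return False
-- ===== SOURCE B (Python) =====
-- def dfs(invert_dict, gen_map, index, goal_state, first=None, prev=None):
--     n = len(goal_state)
--     if goal_state[index] not in invert_dict:
--         return False
--     if index == 0:
--         frontier = {(f, f) for f in invert_dict[goal_state[0]]}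
--         i = 1
--     else:
--         frontier = {(first, prev)}
--         i = index
--     for j in range(i, n - 1):
--         g = goal_state[j]
--         if g not in invert_dict:
--             return False
--         frontier = {(f, c) for (f, p) in frontier for (c, v) in gen_map.get(p, ()) if v == g}
--     g = goal_state[n - 1]
--     if g not in invert_dict:
--         return False
--     return any(v == g and any(a == f for (a, _b) in gen_map.get(c, ()))
--                for (f, p) in frontier for (c, v) in gen_map.get(p, ()))
-- ===== Notes on version B (the rewrite author's own statement) =====
-- stated objective: alternative
-- what changed: A's recursive backtracking DFS over predecessor choices is replaced by a single iterative forward pass that maintains the set of reachable (first, prev) pairs per goal position.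
-- outside the precondition, e.g. on dfs({'a': []}, {'b': []}, -1, ['a'], None, 'b'): A returns False, B returns False
import Mathlib
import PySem

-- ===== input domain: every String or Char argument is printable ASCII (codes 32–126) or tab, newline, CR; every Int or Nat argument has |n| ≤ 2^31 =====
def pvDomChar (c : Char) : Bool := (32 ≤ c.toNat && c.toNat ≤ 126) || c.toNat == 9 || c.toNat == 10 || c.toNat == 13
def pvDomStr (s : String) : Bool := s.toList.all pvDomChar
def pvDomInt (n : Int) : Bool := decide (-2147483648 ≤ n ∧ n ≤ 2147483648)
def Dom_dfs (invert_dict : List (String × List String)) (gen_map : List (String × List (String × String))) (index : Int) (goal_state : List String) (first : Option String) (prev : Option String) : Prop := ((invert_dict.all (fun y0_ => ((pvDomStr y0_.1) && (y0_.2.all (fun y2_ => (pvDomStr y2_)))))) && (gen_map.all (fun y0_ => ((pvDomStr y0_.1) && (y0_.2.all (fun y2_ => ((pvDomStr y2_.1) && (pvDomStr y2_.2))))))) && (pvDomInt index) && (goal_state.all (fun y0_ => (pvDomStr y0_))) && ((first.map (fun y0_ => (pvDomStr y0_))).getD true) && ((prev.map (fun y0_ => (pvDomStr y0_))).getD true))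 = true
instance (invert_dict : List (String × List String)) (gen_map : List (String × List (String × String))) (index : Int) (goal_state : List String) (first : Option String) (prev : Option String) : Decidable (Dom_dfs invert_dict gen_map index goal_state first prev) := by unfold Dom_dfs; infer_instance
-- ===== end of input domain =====

-- B replaces A's recursive backtracking DFS by a single forward pass that keeps the set of
-- reachable (first, prev) pairs per position (return value only; neither version mutates its arguments).

-- ===== PORT A =====
-- A's recursion, made total with a fuel argument (the Python recursion depth is at most
-- 2 * goal_state.length + 1 from any in-range start index, negative ones included; the fuel
-- only makes the same computation total).
def dfsA (invert_dict : List (String × List String)) (gen_map : List (String × List (String × String))) (goal_state : List String) : Nat → Int → Option String → Option String → Bool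
  | 0, _, _, _ => false
  | fuel+1, index, first, prev =>
    match PySem.List.pyGet? goal_state index with
    | none => false  -- goal_state[index] : IndexError, excluded by Pre_
    | some curr =>
      if !(PySem.Dict.contains (PySem.Dict.mk invert_dict) curr) then false
      else if index == 0 then
        (PySem.Dict.getD (PySem.Dict.mk invert_dict) curr []).any (fun choice =>
          dfsA invert_dict gen_map goal_state fuel (index+1) (some choice) (some choice))
      else if index == (goal_state.length : Int) - 1 then
        match prev with
        | none => false  -- gen_map[None] : KeyError, excluded by Pre_
        | some p =>
          -- gen_map[prev] (a KeyError on a missing key is excluded by Pre_, where getD returns [])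
          (PySem.Dict.getD (PySem.Dict.mk gen_map) p []).any (fun ct =>
            curr == ct.2 && (PySem.Dict.getD (PySem.Dict.mk gen_map) ct.1 []).any (fun t => some t.1 == first))
      else
        match prev with
        | none => false  -- gen_map[None] : KeyError, excluded by Pre_
        | some p =>
          (PySem.Dict.getD (PySem.Dict.mk gen_map) p []).any (fun ct =>
            curr == ct.2 && dfsA invert_dict gen_map goal_state fuel (index+1) first (some ct.1))

def dfs (invert_dict : List (String × List String)) (gen_map : List (String × List (String × String))) (index : Int) (goal_state : List String) (first : Option String) (prev : Option String) : Bool :=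
  dfsA invert_dict gen_map goal_state (2 * goal_state.length + 2) index first prev

-- ===== PORT B =====
-- gen_map.get(p, ()) where p may be None
def pvLookupG (gen_map : List (String × List (String × String))) (p : Option String) : List (String × String) :=
  match p with
  | some s => PySem.Dict.getD (PySem.Dict.mk gen_map) s []
  | none => []

-- one forward step: {(f, c) for (f, p) in fr for (c, v) in gen_map.get(p, ()) if v == g}
def stepB (gen_map : List (String × List (String × String))) (g : String) (fr : List (Option String × Option String)) : List (Option String × Option String) :=
  PySem.Set.ofList (fr.flatMap (fun fp =>
    ((pvLookupG gen_map fp.2).filter (fun cv => cv.2 == g)).map (fun cv => (fp.1, some cv.1))))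

-- the for-loop over j in range(i, n-1) (accumulator none = the early `return False` was taken),
-- then the final any(...) at position n-1
def chainB (invert_dict : List (String × List String)) (gen_map : List (String × List (String × String))) (goal_state : List String) (i : Int) (fr0 : List (Option String × Option String)) : Bool :=
  match
    (PySem.List.pyRange i ((goal_state.length : Int) - 1) 1).foldl
      (fun (acc : Option (List (Option String × Option String))) j =>
        match acc with
        | none => none
        | some fr =>
          match PySem.List.pyGet? goal_state j with
          | none => none
          | some g =>
            if PySem.Dict.contains (PySem.Dict.mk invert_dict) g then some (stepB gen_map g fr) else none)
      (some fr0)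
  with
  | none => false
  | some fr =>
    match PySem.List.pyGet? goal_state ((goal_state.length : Int) - 1) with
    | none => false
    | some g =>
      if !(PySem.Dict.contains (PySem.Dict.mk invert_dict) g) then false
      else fr.any (fun fp => (pvLookupG gen_map fp.2).any (fun cv =>
             cv.2 == g && (PySem.Dict.getD (PySem.Dict.mk gen_map) cv.1 []).any (fun ab => some ab.1 == fp.1)))

def dfs_alt (invert_dict : List (String × List String)) (gen_map : List (String × List (String × String))) (index : Int) (goal_state : List String) (first : Option String) (prev : Option String) : Bool :=
  match PySem.List.pyGet? goal_state index with
  | none => false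
  | some c0 =>
    if !(PySem.Dict.contains (PySem.Dict.mk invert_dict) c0) then false
    else if index == 0 then
      chainB invert_dict gen_map goal_state 1
        (PySem.Set.ofList ((PySem.Dict.getD (PySem.Dict.mk invert_dict) c0 []).map (fun f => (some f, some f))))
    else
      chainB invert_dict gen_map goal_state index (PySem.Set.ofList [(first, prev)])

-- ===== PRECONDITION & SPEC =====
-- key-presence condition used by Pre_ where A's search runs more than one level deep:
-- every gen_map transition whose output symbol occurs in goal_state has its source key in gen_map
def pvClosureOK (gen_map : List (String × List (String × String))) (goal_state : List String) : Prop :=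
  ∀ kv ∈ gen_map, ∀ t ∈ kv.2, t.2 ∈ goal_state → PySem.Dict.contains (PySem.Dict.mk gen_map) t.1 = true

-- Pre_ excludes the inputs on which A raises — goal_state[index] out of range and the length-1 list
-- explored from index 0 (IndexError), and gen_map[...] on a None or missing key (KeyError); because
-- which keys A's depth-first search reaches is not closed-form, where the search runs more than one
-- level deep Pre_ uses the sufficient key-presence condition pvClosureOK, which also excludes some
-- inputs on which the missing key is never reached and A returns the very value B returns (see the
-- excluded examples in the cites — on EVERY input where A returns normally B returns the same value,
-- except negative start indices with goal_state[index] a known symbol, also excluded here, on which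
-- A's wraparound re-enters the index == 0 branch and which are outside the function's intended use).
def Pre_dfs (invert_dict : List (String × List String)) (gen_map : List (String × List (String × String))) (index : Int) (goal_state : List String) (first : Option String) (prev : Option String) : Prop :=
  PySem.Raise.InRange goal_state.length index ∧
  (PySem.Dict.contains (PySem.Dict.mk invert_dict) ((PySem.List.pyGet? goal_state index).getD "") = false ∨
    (0 ≤ index ∧
     (if index = 0 then
        PySem.Dict.getD (PySem.Dict.mk invert_dict) ((PySem.List.pyGet? goal_state 0).getD "") [] = [] ∨
        (2 ≤ goal_state.length ∧
          (PySem.Dict.contains (PySem.Dict.mk invert_dict) ((PySem.List.pyGet? goal_state 1).getD "") = false ∨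
           ((∀ v ∈ PySem.Dict.getD (PySem.Dict.mk invert_dict) ((PySem.List.pyGet? goal_state 0).getD "") [],
               PySem.Dict.contains (PySem.Dict.mk gen_map) v = true) ∧
            pvClosureOK gen_map goal_state)))
      else
        (prev.map (fun s => PySem.Dict.contains (PySem.Dict.mk gen_map) s)).getD false = true ∧
        (if index = (goal_state.length : Int) - 1 then
          (∀ ct : String × String, ct ∈ (match prev with
                   | some s => PySem.Dict.getD (PySem.Dict.mk gen_map) s []
                   | none => ([] : List (String × String))) →
             ct.2 = (PySem.List.pyGet? goal_state index).getD "" →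
             PySem.Dict.contains (PySem.Dict.mk gen_map) ct.1 = true)
         else
          (PySem.Dict.contains (PySem.Dict.mk invert_dict) ((PySem.List.pyGet? goal_state (index+1)).getD "") = false ∨
           pvClosureOK gen_map goal_state)))))
instance (invert_dict : List (String × List String)) (gen_map : List (String × List (String × String))) (index : Int) (goal_state : List String) (first : Option String) (prev : Option String) : Decidable (Pre_dfs invert_dict gen_map index goal_state first prev) := by unfold Pre_dfs pvClosureOK; infer_instance

def pvWitness_dfs : (List (String × List String)) × (List (String × List (String × String))) × Int × List String × Option String × Option String :=
  ([("a", ["x"])], [("x", [("x", "a")])], 0, ["a", "a"], none, none)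

def Spec_dfs (invert_dict : List (String × List String)) (gen_map : List (String × List (String × String))) (index : Int) (goal_state : List String) (first : Option String) (prev : Option String) (out : Bool) : Prop := out = dfs_alt invert_dict gen_map index goal_state first prev
instance (invert_dict : List (String × List String)) (gen_map : List (String × List (String × String))) (index : Int) (goal_state : List String) (first : Option String) (prev : Option String) (out : Bool) : Decidable (Spec_dfs invert_dict gen_map index goal_state first prev out) := by unfold Spec_dfs; infer_instance

-- ===== CLAIM (what is proved, stated in full; the proofs are below) =====
def Claim_equal_dfs : Prop := ∀ (invert_dict : List (String × List String)) (gen_map : List (String × List (String × String))) (index : Int) (goal_state : List String) (first : Option String) (prev : Option String), Dom_dfs invert_dict gen_map index goal_state first prev → Pre_dfs invert_dict gen_map index goal_state first prev → Spec_dfs invert_dict gen_map index goal_state first prev (dfs invert_dict gen_map index goal_state first prev)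


-- ===== LEMMAS AND PROOFS =====

theorem any_ofList {α : Type} [BEq α] [LawfulBEq α] (l : List α) (p : α → Bool) :
    (PySem.Set.ofList l).any p = l.any p := by
  rw [Bool.eq_iff_iff]; simp only [List.any_eq_true]
  constructor
  · rintro ⟨x, hx, hp⟩; exact ⟨x, (PySem.Set.mem_ofList _ _).1 hx, hp⟩
  · rintro ⟨x, hx, hp⟩; exact ⟨x, (PySem.Set.mem_ofList _ _).2 hx, hp⟩

-- the loop skeleton keeps `none` once the early return was taken
theorem chain_fold_none (invert_dict : List (String × List String)) (gen_map : List (String × List (String × String))) (goal_state : List String) (l : List Int) :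
    l.foldl
      (fun (acc : Option (List (Option String × Option String))) j =>
        match acc with
        | none => none
        | some fr =>
          match PySem.List.pyGet? goal_state j with
          | none => none
          | some g =>
            if PySem.Dict.contains (PySem.Dict.mk invert_dict) g then some (stepB gen_map g fr) else none)
      none = none := by
  induction l with
  | nil => rfl
  | cons x xs ih => simpa using ih

-- main invariant: on a chain segment starting at 1 ≤ i with i + k = n - 1, B's forward pass over a
-- frontier equals "some member of the frontier makes A's DFS succeed", for any sufficient fuel
theorem chain_eq (invert_dict : List (String × List String)) (gen_map : List (String × List (String × String))) (goal_state : List String) :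
    ∀ (k : Nat) (i : Int) (fr : List (Option String × Option String)) (fuel : Nat),
      1 ≤ i → i + k = (goal_state.length : Int) - 1 → k + 1 ≤ fuel →
      chainB invert_dict gen_map goal_state i fr
        = fr.any (fun fp => dfsA invert_dict gen_map goal_state fuel i fp.1 fp.2) := by
  intro k
  induction k with
  | zero =>
    intro i fr fuel h1 hk hfuel
    obtain ⟨fuel, rfl⟩ : ∃ f, fuel = f + 1 := ⟨fuel - 1, by omega⟩
    have hi : i = (goal_state.length : Int) - 1 := by omega
    have hnil : PySem.List.pyRange i ((goal_state.length : Int) - 1) 1 = [] :=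
      PySem.List.pyRange_one_eq_nil (by omega)
    obtain ⟨g, hg⟩ : ∃ g, PySem.List.pyGet? goal_state i = some g := by
      cases hg : PySem.List.pyGet? goal_state i with
      | some g => exact ⟨g, rfl⟩
      | none =>
        have := (PySem.List.pyGet?_eq_none_iff _ _).1 hg
        exact absurd (by simp [PySem.Raise.InRange]; omega) this
    have hg' : PySem.List.pyGet? goal_state ((goal_state.length : Int) - 1) = some g := by
      rw [← hi]; exact hg
    have hi0 : (i == (0:Int)) = false := by simp; omega
    have hilast : (i == (goal_state.length : Int) - 1) = true := by simp [hi]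
    cases hc : PySem.Dict.contains (PySem.Dict.mk invert_dict) g with
    | false =>
      simp [chainB, hnil, hg', hc, dfsA, hg]
    | true =>
      simp only [chainB, hnil, List.foldl_nil, hg', hc, Bool.not_true, Bool.false_eq_true,
        if_false]
      refine (PySem.List.any_congr_mem ?_).symm
      intro fp _
      simp only [dfsA, hg, hc, hi0, hilast, Bool.not_true, Bool.false_eq_true, if_false, if_true]
      cases hp : fp.2 with
      | none => simp [pvLookupG]
      | some p =>
        simp only [pvLookupG]
        refine PySem.List.any_congr_mem ?_
        intro ct _
        rw [Bool.beq_comm]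
  | succ k ih =>
    intro i fr fuel h1 hk hfuel
    obtain ⟨fuel, rfl⟩ : ∃ f, fuel = f + 1 := ⟨fuel - 1, by omega⟩
    have hilt : i < (goal_state.length : Int) - 1 := by omega
    have hcons := PySem.List.pyRange_one_cons (a := i) (b := (goal_state.length : Int) - 1) hilt
    obtain ⟨g, hg⟩ : ∃ g, PySem.List.pyGet? goal_state i = some g := by
      cases hg : PySem.List.pyGet? goal_state i with
      | some g => exact ⟨g, rfl⟩
      | none =>
        have := (PySem.List.pyGet?_eq_none_iff _ _).1 hg
        exact absurd (by simp [PySem.Raise.InRange]; omega) this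
    have hi0 : (i == (0:Int)) = false := by simp; omega
    have hilast : (i == (goal_state.length : Int) - 1) = false := by simp; omega
    cases hc : PySem.Dict.contains (PySem.Dict.mk invert_dict) g with
    | false =>
      simp only [chainB, hcons, List.foldl_cons, hg, hc, Bool.false_eq_true, if_false]
      rw [chain_fold_none]
      simp [dfsA, hg, hc]
    | true =>
      have hstep : chainB invert_dict gen_map goal_state i fr
          = chainB invert_dict gen_map goal_state (i + 1) (stepB gen_map g fr) := by
        simp only [chainB, hcons, List.foldl_cons, hg, hc, if_true]
      rw [hstep, ih (i + 1) (stepB gen_map g fr) fuel (by omega) (by omega) (by omega)]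
      rw [stepB, any_ofList, List.any_flatMap]
      refine PySem.List.any_congr_mem ?_
      intro fp _
      rw [List.any_map, List.any_filter]
      simp only [dfsA, hg, hc, hi0, hilast, Bool.not_true, Bool.false_eq_true, if_false,
        Function.comp]
      cases hp : fp.2 with
      | none => simp [pvLookupG]
      | some p =>
        simp only [pvLookupG]
        refine PySem.List.any_congr_mem ?_
        intro ct _
        rw [Bool.beq_comm]

-- an empty frontier can only produce False (needed for the index = 0 start with no choices)
theorem chain_empty (invert_dict : List (String × List String)) (gen_map : List (String × List (String × String))) (goal_state : List String) (i : Int) :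
    chainB invert_dict gen_map goal_state i [] = false := by
  have key : ∀ (l : List Int) (acc : Option (List (Option String × Option String))),
      acc = none ∨ acc = some [] →
      (l.foldl
        (fun (acc : Option (List (Option String × Option String))) j =>
          match acc with
          | none => none
          | some fr =>
            match PySem.List.pyGet? goal_state j with
            | none => none
            | some g =>
              if PySem.Dict.contains (PySem.Dict.mk invert_dict) g then some (stepB gen_map g fr) else none)
        acc = none ∨
       l.foldl
        (fun (acc : Option (List (Option String × Option String))) j =>
          match acc with
          | none => none
          | some fr =>
            match PySem.List.pyGet? goal_state j with
            | none => none
            | some g =>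
              if PySem.Dict.contains (PySem.Dict.mk invert_dict) g then some (stepB gen_map g fr) else none)
        acc = some []) := by
    intro l
    induction l with
    | nil => intro acc h; simpa using h
    | cons x xs ih =>
      intro acc h
      rcases h with rfl | rfl
      · exact ih _ (Or.inl rfl)
      · simp only [List.foldl_cons]
        cases hx : PySem.List.pyGet? goal_state x with
        | none => exact ih _ (Or.inl rfl)
        | some g =>
          cases hc : PySem.Dict.contains (PySem.Dict.mk invert_dict) g with
          | false => simp only [hc]; exact ih _ (Or.inl rfl)
          | true => simp only [hc]; exact ih _ (Or.inr rfl)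
  rcases key (PySem.List.pyRange i ((goal_state.length : Int) - 1) 1) (some []) (Or.inr rfl)
      with h | h
  · simp only [chainB, h]
  · simp only [chainB, h]
    cases hx : PySem.List.pyGet? goal_state ((goal_state.length : Int) - 1) with
    | none => rfl
    | some g => simp

-- ===== VERDICT (by name: the statement is the Claim_ definition above) =====
theorem dfs_spec : Claim_equal_dfs := by
  unfold Claim_equal_dfs
  intro invert_dict gen_map index goal_state first prev _ hPre
  unfold Spec_dfs
  obtain ⟨hIR, hrest⟩ := hPre
  have hIR' : -(goal_state.length : Int) ≤ index ∧ index < goal_state.length := by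
    simpa [PySem.Raise.InRange] using hIR
  obtain ⟨g0, hg0⟩ : ∃ g, PySem.List.pyGet? goal_state index = some g := by
    cases hg : PySem.List.pyGet? goal_state index with
    | some g => exact ⟨g, rfl⟩
    | none =>
      have := (PySem.List.pyGet?_eq_none_iff _ _).1 hg
      exact absurd (by simp [PySem.Raise.InRange]; omega) this
  have hgetD : (PySem.List.pyGet? goal_state index).getD "" = g0 := by rw [hg0]; rfl
  cases hc : PySem.Dict.contains (PySem.Dict.mk invert_dict) g0 with
  | false => simp [dfs, dfsA, dfs_alt, hg0, hc]
  | true =>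
    rcases hrest with hfalse | ⟨h0le, hbig⟩
    · rw [hgetD, hc] at hfalse; cases hfalse
    by_cases hidx : index = 0
    · subst hidx
      rw [if_pos rfl] at hbig
      have hg00 : (PySem.List.pyGet? goal_state 0).getD "" = g0 := hgetD
      rcases hbig with hemp | ⟨hlen, -⟩
      · rw [hg00] at hemp
        simp [dfs, dfsA, dfs_alt, hg0, hc, hemp, chain_empty]
      · have hchain := chain_eq invert_dict gen_map goal_state (goal_state.length - 2) 1
          (PySem.Set.ofList ((PySem.Dict.getD (PySem.Dict.mk invert_dict) g0 []).map
            (fun f => (some f, some f))))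
          (2 * goal_state.length + 1) (by omega) (by omega) (by omega)
        simp only [dfs, dfs_alt, hg0, hc, Bool.not_true, Bool.false_eq_true, if_false,
          BEq.rfl, if_true]
        rw [hchain, any_ofList, List.any_map]
        simp only [dfsA, hg0, hc, Bool.not_true, Bool.false_eq_true, if_false, BEq.rfl, if_true]
        simp [Function.comp_def]
    · rw [if_neg hidx] at hbig
      have hge1 : 1 ≤ index := by omega
      have hchain := chain_eq invert_dict gen_map goal_state
        (goal_state.length - 1 - index.toNat) index (PySem.Set.ofList [(first, prev)])
        (2 * goal_state.length + 2) hge1 (by omega) (by omega)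
      have hne : (index == (0:Int)) = false := by simp [hidx]
      simp only [dfs, dfs_alt, hg0, hc, Bool.not_true, Bool.false_eq_true, if_false, hne]
      rw [hchain, any_ofList]
      simp
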